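-- pv_equiv track=rewrite | github.com/nicolasfwyss/extract-bench-experiments | src/extract_bench/evaluation/reporting/outcome_stats.py | _infer_schema_type
-- ===== SOURCE A (Python) =====
-- def _infer_schema_type(metric_id: str) -> str:
--     """Infer schema type from metric_id prefix. Fallback to 'unknown' for custom metrics."""
--     for prefix, schema_type in (
--         ("string_", "string"),
--         ("number_", "number"),
--         ("integer_", "integer"),
--         ("boolean_", "boolean"),
--         ("array_", "array"),
--     ):
--         if metric_id.startswith(prefix):
--             return schema_type
--     return "unknown"
-- ===== SOURCE B (Python) =====
-- _SCHEMA_BY_STEM = {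
--     "string": "string",
--     "number": "number",
--     "integer": "integer",
--     "boolean": "boolean",
--     "array": "array",
-- }
--
--
-- def _infer_schema_type(metric_id: str) -> str:
--     """Infer schema type from metric_id prefix. Fallback to 'unknown' for custom metrics."""
--     head, sep, _ = metric_id.partition("_")
--     if not sep:
--         return "unknown"
--     return _SCHEMA_BY_STEM.get(head, "unknown")
-- ===== Notes on version B (the rewrite author's own statement) =====
-- stated objective: simpler
-- what changed: Replaces the five-way startswith scan with one partition('_') extracting the prefix stem followed by a single dict lookup (empty separator, i.e. no underscore, yields 'unknown').
import Mathlib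
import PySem

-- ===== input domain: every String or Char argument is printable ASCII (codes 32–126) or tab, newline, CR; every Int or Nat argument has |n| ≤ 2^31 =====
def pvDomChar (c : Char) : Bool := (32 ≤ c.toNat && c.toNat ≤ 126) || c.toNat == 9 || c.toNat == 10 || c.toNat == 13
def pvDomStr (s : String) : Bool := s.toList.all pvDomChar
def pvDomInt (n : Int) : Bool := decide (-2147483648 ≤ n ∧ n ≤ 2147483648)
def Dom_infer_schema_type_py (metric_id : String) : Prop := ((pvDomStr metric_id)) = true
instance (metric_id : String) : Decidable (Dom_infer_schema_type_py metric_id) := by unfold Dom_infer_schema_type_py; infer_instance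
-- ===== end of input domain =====

-- B replaces A's five-way startswith scan by extracting the prefix stem once (partition at '_')
-- and looking it up in a precomputed table; objective: simpler. Proven equal on all of Dom.


-- ===== PORT A =====
def infer_schema_type_py (metric_id : String) : String :=
  if PySem.Str.startswith metric_id "string_" then "string"
  else if PySem.Str.startswith metric_id "number_" then "number"
  else if PySem.Str.startswith metric_id "integer_" then "integer"
  else if PySem.Str.startswith metric_id "boolean_" then "boolean"
  else if PySem.Str.startswith metric_id "array_" then "array"
  else "unknown"

-- ===== PORT B =====
def pvSchemaByStem : PySem.Dict String String :=
  PySem.Dict.ofList [("string", "string"), ("number", "number"), ("integer", "integer"),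
                     ("boolean", "boolean"), ("array", "array")]

-- metric_id.partition("_") ported by hand (exact for the one-char separator '_'):
-- head = the characters before the first '_', sep is nonempty iff '_' occurs in the string.
def infer_schema_type_py_alt (metric_id : String) : String :=
  let cs := metric_id.toList
  let head := String.ofList (cs.takeWhile (fun c => c != '_'))
  let sep := cs.contains '_'
  if sep = false then "unknown"
  else pvSchemaByStem.getD head "unknown"

-- ===== PRECONDITION & SPEC =====
def Spec_infer_schema_type_py (metric_id : String) (out : String) : Prop := out = infer_schema_type_py_alt metric_id
instance (metric_id : String) (out : String) : Decidable (Spec_infer_schema_type_py metric_id out) := by unfold Spec_infer_schema_type_py; infer_instance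

-- ===== CLAIM (what is proved, stated in full; the proofs are below) =====
def Claim_equal_infer_schema_type_py : Prop := ∀ (metric_id : String), Dom_infer_schema_type_py metric_id → Spec_infer_schema_type_py metric_id (infer_schema_type_py metric_id)

-- ===== LEMMAS AND PROOFS =====

lemma takeWhile_stem_underscore (stem rest : List Char) (h : '_' ∉ stem) :
    (stem ++ '_' :: rest).takeWhile (fun c => c != '_') = stem := by
  induction stem with
  | nil => simp
  | cons a t ih =>
    have ha : a ≠ '_' := fun e => h (by simp [e])
    simp only [List.cons_append, List.takeWhile_cons]
    simp [ha, ih (fun hm => h (List.mem_cons_of_mem _ hm))]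

lemma startswith_stem_iff (stem : List Char) (h : '_' ∉ stem) (cs : List Char) :
    PySem.Chars.startswith cs (stem ++ ['_']) = true ↔
      (cs.takeWhile (fun c => c != '_') = stem ∧ '_' ∈ cs) := by
  rw [PySem.Chars.startswith_iff]
  constructor
  · rintro ⟨rest, hrest⟩
    subst hrest
    constructor
    · simpa using takeWhile_stem_underscore stem rest h
    · simp
  · rintro ⟨htw, hmem⟩
    have hd : cs.dropWhile (fun c => c != '_') ≠ [] := by
      intro hnil
      have := List.takeWhile_append_dropWhile (p := fun c => c != '_') (l := cs)
      rw [hnil, List.append_nil, htw] at this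
      exact h (this ▸ hmem)
    obtain ⟨d, ds, hds⟩ := List.exists_cons_of_ne_nil hd
    have hdhead : (fun c => c != '_') d = false := by
      have := List.head_dropWhile_not (p := fun c => c != '_') (l := cs) hd
      simpa [hds] using this
    have hdeq : d = '_' := by simpa using hdhead
    refine ⟨ds, ?_⟩
    have := List.takeWhile_append_dropWhile (p := fun c => c != '_') (l := cs)
    rw [htw, hds, hdeq] at this
    simpa using this

lemma no_underscore_startswith (stem : List Char) (cs : List Char) (hmem : '_' ∉ cs) :
    PySem.Chars.startswith cs (stem ++ ['_']) = false := by
  by_contra hne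
  have : PySem.Chars.startswith cs (stem ++ ['_']) = true := by
    cases hb : PySem.Chars.startswith cs (stem ++ ['_']) with
    | false => exact absurd hb hne
    | true => rfl
  rw [PySem.Chars.startswith_iff] at this
  obtain ⟨rest, hrest⟩ := this
  exact hmem (by rw [← hrest]; simp)

-- ===== VERDICT (by name: the statement is the Claim_ definition above) =====
theorem infer_schema_type_py_spec : Claim_equal_infer_schema_type_py := by
  intro s _
  unfold Spec_infer_schema_type_py infer_schema_type_py infer_schema_type_py_alt
  simp only [PySem.Str.startswith_eq]
  by_cases hmem : '_' ∈ s.toList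
  · have hc : s.toList.contains '_' = true := by simpa using hmem
    simp only [hc, if_neg (by simp : ¬ (true = false))]
    have hs1 := startswith_stem_iff "string".toList (by decide) s.toList
    have hs2 := startswith_stem_iff "number".toList (by decide) s.toList
    have hs3 := startswith_stem_iff "integer".toList (by decide) s.toList
    have hs4 := startswith_stem_iff "boolean".toList (by decide) s.toList
    have hs5 := startswith_stem_iff "array".toList (by decide) s.toList
    have e1 : "string_".toList = "string".toList ++ ['_'] := by decide
    have e2 : "number_".toList = "number".toList ++ ['_'] := by decide
    have e3 : "integer_".toList = "integer".toList ++ ['_'] := by decide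
    have e4 : "boolean_".toList = "boolean".toList ++ ['_'] := by decide
    have e5 : "array_".toList = "array".toList ++ ['_'] := by decide
    simp only [e1, e2, e3, e4, e5]
    set tw := s.toList.takeWhile (fun c => c != '_') with htw
    by_cases h1 : tw = "string".toList
    · rw [if_pos (hs1.mpr ⟨h1, hmem⟩), h1]; decide
    · rw [if_neg (fun hb => h1 ((hs1.mp hb).1))]
      by_cases h2 : tw = "number".toList
      · rw [if_pos (hs2.mpr ⟨h2, hmem⟩), h2]; decide
      · rw [if_neg (fun hb => h2 ((hs2.mp hb).1))]
        by_cases h3 : tw = "integer".toList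
        · rw [if_pos (hs3.mpr ⟨h3, hmem⟩), h3]; decide
        · rw [if_neg (fun hb => h3 ((hs3.mp hb).1))]
          by_cases h4 : tw = "boolean".toList
          · rw [if_pos (hs4.mpr ⟨h4, hmem⟩), h4]; decide
          · rw [if_neg (fun hb => h4 ((hs4.mp hb).1))]
            by_cases h5 : tw = "array".toList
            · rw [if_pos (hs5.mpr ⟨h5, hmem⟩), h5]; decide
            · rw [if_neg (fun hb => h5 ((hs5.mp hb).1))]
              -- head is none of the five stems: the table lookup falls through to the default
              have hmk : ∀ t : String, String.ofList tw = t → tw = t.toList := by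
                intro t ht; rw [← ht]; simp
              have hget : pvSchemaByStem.get? (String.ofList tw) = none := by
                have hd : pvSchemaByStem =
                    PySem.Dict.mk [("string", "string"), ("number", "number"),
                      ("integer", "integer"), ("boolean", "boolean"), ("array", "array")] := by
                  decide
                rw [hd]
                simp only [PySem.Dict.get?_mk_cons]
                have b1 : ("string" == String.ofList tw) = false := by
                  simpa using fun e => h1 (hmk _ e.symm)
                have b2 : ("number" == String.ofList tw) = false := by
                  simpa using fun e => h2 (hmk _ e.symm)
                have b3 : ("integer" == String.ofList tw) = false := by
                  simpa using fun e => h3 (hmk _ e.symm)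
                have b4 : ("boolean" == String.ofList tw) = false := by
                  simpa using fun e => h4 (hmk _ e.symm)
                have b5 : ("array" == String.ofList tw) = false := by
                  simpa using fun e => h5 (hmk _ e.symm)
                simp [b1, b2, b3, b4, b5, PySem.Dict.get?]
              simp [PySem.Dict.getD, hget]
  · have hc : s.toList.contains '_' = false := by simpa using hmem
    simp only [hc]
    have e1 : "string_".toList = "string".toList ++ ['_'] := by decide
    have e2 : "number_".toList = "number".toList ++ ['_'] := by decide
    have e3 : "integer_".toList = "integer".toList ++ ['_'] := by decide
    have e4 : "boolean_".toList = "boolean".toList ++ ['_'] := by decide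
    have e5 : "array_".toList = "array".toList ++ ['_'] := by decide
    simp only [e1, e2, e3, e4, e5]
    rw [no_underscore_startswith _ _ hmem, no_underscore_startswith _ _ hmem,
        no_underscore_startswith _ _ hmem, no_underscore_startswith _ _ hmem,
        no_underscore_startswith _ _ hmem]
    simp
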